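-- pv_equiv track=rewrite | github.com/Vector-7/algorithmbox-reboot | solutions/codeforces-1594b.py | process
-- ===== SOURCE A (Python) =====
-- MODULA = 1_000_000_000 + 7
--
-- def process(N, K):
--     r = 1       # 제곱수 (N**0, N**1 ... N**i)
--     ans = 0
--     i = 0       # while문 돌 때마다 1씩 증가
--     while K > 0:
--         if i > 0:
--             # i가 1이상일 때만 제곱한다
--             r = (r * N) % MODULA
--         if K & 1 == 1:
--             # K에 0x01이 있는 경우만 ans를 합한다.
--             ans = (ans+r) % MODULA
--         i += 1
--         # K를 앞으로 땡기기
--         K = K>>1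
--     return ans
-- ===== SOURCE B (Python) =====
-- MODULA = 1_000_000_000 + 7
--
-- def process(N, K):
--     if K <= 0:
--         return 0
--     return sum(pow(N, i, MODULA) for i in range(K.bit_length()) if (K >> i) & 1) % MODULA
-- ===== Notes on version B (the rewrite author's own statement) =====
-- stated objective: simpler
-- what changed: Replaces the incremental while-loop that maintains a running power and accumulator across bits with a single comprehension summing an independently computed pow(N, i, MODULA) for each set bit of K.
import Mathlib
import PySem

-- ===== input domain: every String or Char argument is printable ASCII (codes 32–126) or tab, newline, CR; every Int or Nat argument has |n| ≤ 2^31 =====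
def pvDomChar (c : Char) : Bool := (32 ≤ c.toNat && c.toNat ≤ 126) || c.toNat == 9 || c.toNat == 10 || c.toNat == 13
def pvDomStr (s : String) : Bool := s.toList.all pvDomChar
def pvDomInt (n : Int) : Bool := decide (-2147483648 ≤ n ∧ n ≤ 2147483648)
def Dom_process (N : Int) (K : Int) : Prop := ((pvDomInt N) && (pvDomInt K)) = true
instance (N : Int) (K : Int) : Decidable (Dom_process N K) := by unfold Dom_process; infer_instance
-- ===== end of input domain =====

-- B replaces A's incremental while-loop (running power and accumulator over the bits of K)
-- with one comprehension summing an independent pow(N, i, MODULA) per set bit of K (objective: simpler).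

def MODULA : Int := 1000000000 + 7

-- ===== PORT A =====
-- while K > 0: (if i > 0: r = r*N % M); (if K & 1 == 1: ans = (ans+r) % M); i += 1; K >>= 1
def processLoop (N : Int) (K : Int) (r : Int) (ans : Int) (i : Nat) : Int :=
  if h : K > 0 then
    let r' := if i > 0 then PySem.Int.mod (r * N) MODULA else r
    let ans' := if PySem.Int.band K 1 == 1 then PySem.Int.mod (ans + r') MODULA else ans
    processLoop N (K >>> (1:Nat)) r' ans' (i + 1)
  else ans
termination_by K.toNat
decreasing_by
  rw [Int.shiftRight_eq_div_pow]
  norm_num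
  omega

def process (N : Int) (K : Int) : Int := processLoop N K 1 0 0

-- ===== PORT B =====
def process_alt (N : Int) (K : Int) : Int :=
  if K ≤ 0 then 0
  else
    PySem.Int.mod
      ((((PySem.List.pyRange 0 ((PySem.Int.bitLength K : Nat) : Int) 1).filter
          (fun i => PySem.Int.band (K >>> i.toNat) 1 == 1)).map
          (fun i => PySem.Int.powMod N i.toNat MODULA)).sum)
      MODULA

-- ===== PRECONDITION & SPEC =====
def Spec_process (N : Int) (K : Int) (out : Int) : Prop := out = process_alt N K
instance (N : Int) (K : Int) (out : Int) : Decidable (Spec_process N K out) := by unfold Spec_process; infer_instance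

-- ===== CLAIM (what is proved, stated in full; the proofs are below) =====
def Claim_equal_process : Prop := ∀ (N : Int) (K : Int), Dom_process N K → Spec_process N K (process N K)

-- ===== LEMMAS AND PROOFS =====

-- the mathematical value both programs compute (before the final reduction mod MODULA):
-- pvU N k = Σ N^i over the set bits i of k, by halving recursion
def pvU (N : Int) : Nat → Int
  | 0 => 0
  | (k+1) => (if (k+1) % 2 = 1 then 1 else 0) + N * pvU N ((k+1)/2)
termination_by k => k
decreasing_by omega

lemma pvU_zero (N : Int) : pvU N 0 = 0 := by simp [pvU]

lemma pvU_pos (N : Int) (k : Nat) (hk : 0 < k) :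
    pvU N k = (if k % 2 = 1 then 1 else 0) + N * pvU N (k/2) := by
  cases k with
  | zero => omega
  | succ m => simp [pvU]

lemma hMpos : (0:Int) < MODULA := by unfold MODULA; norm_num

lemma pv_add_emod_right (a x M : Int) : (a + x % M) % M = (a + x) % M := by
  rw [add_comm, Int.emod_add_emod, add_comm]

lemma pv_mul_absorb (a x c M : Int) : (a + x % M * c) % M = (a + x * c) % M := by
  conv_lhs => rw [Int.add_emod, Int.mul_emod, Int.emod_emod_of_dvd _ dvd_rfl]
  rw [← Int.mul_emod, ← Int.add_emod]

lemma pv_shift_one (k : Nat) : ((k:Int) >>> (1:Nat)) = ((k/2 : Nat) : Int) := by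
  rw [Int.shiftRight_eq_div_pow]
  norm_num

lemma pv_ite_band_odd {α : Sort _} (k : Nat) (h : k % 2 = 1) (a b : α) :
    (if PySem.Int.band (k:Int) 1 == 1 then a else b) = a := by
  have hb : (PySem.Int.band (k:Int) 1 == 1) = true := by
    rw [PySem.Int.band_one, PySem.Int.mod_eq_emod_of_pos (by norm_num : (0:Int) < 2)]
    simp only [beq_iff_eq]
    omega
  rw [hb]
  rfl

lemma pv_ite_band_even {α : Sort _} (k : Nat) (h : ¬ k % 2 = 1) (a b : α) :
    (if PySem.Int.band (k:Int) 1 == 1 then a else b) = b := by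
  have hb : (PySem.Int.band (k:Int) 1 == 1) = false := by
    rw [PySem.Int.band_one, PySem.Int.mod_eq_emod_of_pos (by norm_num : (0:Int) < 2)]
    simp only [beq_eq_false_iff_ne, ne_eq]
    omega
  rw [hb]
  rfl

-- A's loop, once i ≥ 1, computes (ans + r * N * pvU k) % MODULA
lemma pv_loop_eq (N : Int) : ∀ k : Nat, 0 < k → ∀ i : Nat, 0 < i → ∀ r ans : Int,
    processLoop N (k : Int) r ans i = (ans + r * (N * pvU N k)) % MODULA := by
  intro k
  induction k using Nat.strong_induction_on with
  | _ k ih =>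
  intro hk i hi r ans
  rw [processLoop.eq_def, dif_pos (by exact_mod_cast hk : (k:Int) > 0)]
  simp only [if_pos hi]
  rw [pv_shift_one]
  rcases Nat.eq_zero_or_pos (k/2) with h2 | h2
  · have hk1 : k = 1 := by omega
    subst hk1
    rw [show (((1:Nat)/2 : Nat) : Int) = 0 by norm_num]
    rw [processLoop.eq_def, dif_neg (by norm_num : ¬ ((0:Int) > 0))]
    rw [pv_ite_band_odd 1 (by norm_num)]
    simp only [PySem.Int.mod_eq_emod_of_pos hMpos]
    rw [pv_add_emod_right, pvU_pos N 1 (by norm_num), pvU_zero,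
        if_pos (by norm_num : (1:Nat) % 2 = 1)]
    congr 1
    ring
  · by_cases hodd : k % 2 = 1
    · rw [pv_ite_band_odd k hodd]
      rw [ih (k/2) (by omega) h2 (i+1) (by omega)]
      simp only [PySem.Int.mod_eq_emod_of_pos hMpos]
      rw [Int.emod_add_emod, pv_mul_absorb]
      rw [show ans + r * N % MODULA + r * N * (N * pvU N (k/2))
            = (ans + r * N * (N * pvU N (k/2))) + r * N % MODULA by ring]
      rw [pv_add_emod_right, pvU_pos N k hk, if_pos hodd]
      congr 1
      ring
    · rw [pv_ite_band_even k hodd]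
      rw [ih (k/2) (by omega) h2 (i+1) (by omega)]
      simp only [PySem.Int.mod_eq_emod_of_pos hMpos]
      rw [pv_mul_absorb, pvU_pos N k hk, if_neg hodd]
      congr 1
      ring

-- characterization of A
lemma pv_process_char (N : Int) (k : Nat) (hk : 0 < k) :
    process N (k : Int) = pvU N k % MODULA := by
  unfold process
  rw [processLoop.eq_def, dif_pos (by exact_mod_cast hk : (k:Int) > 0)]
  simp only [if_neg (lt_irrefl 0), Nat.zero_add]
  rw [pv_shift_one]
  rcases Nat.eq_zero_or_pos (k/2) with h2 | h2
  · have hk1 : k = 1 := by omega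
    subst hk1
    rw [show (((1:Nat)/2 : Nat) : Int) = 0 by norm_num]
    rw [processLoop.eq_def, dif_neg (by norm_num : ¬ ((0:Int) > 0))]
    rw [pv_ite_band_odd 1 (by norm_num)]
    rw [PySem.Int.mod_eq_emod_of_pos hMpos, pvU_pos N 1 (by norm_num), pvU_zero,
        if_pos (by norm_num : (1:Nat) % 2 = 1)]
    norm_num
  · by_cases hodd : k % 2 = 1
    · rw [pv_ite_band_odd k hodd, pv_loop_eq N (k/2) h2 1 Nat.one_pos]
      simp only [PySem.Int.mod_eq_emod_of_pos hMpos]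
      rw [Int.emod_add_emod, pvU_pos N k hk, if_pos hodd]
      congr 1
      ring
    · rw [pv_ite_band_even k hodd, pv_loop_eq N (k/2) h2 1 Nat.one_pos,
          pvU_pos N k hk, if_neg hodd]
      congr 1
      ring

-- filter-then-map as a single if-sum
lemma pv_sum_filter_map (l : List Int) (p : Int → Bool) (f : Int → Int) :
    ((l.filter p).map f).sum = (l.map (fun x => if p x then f x else 0)).sum := by
  induction l with
  | nil => rfl
  | cons a l ih => by_cases h : p a <;> simp [h, ih]

-- B normalized to an if-sum over Nat indices
lemma pv_alt_sum (N : Int) (k : Nat) (hk : 0 < k) :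
    process_alt N (k : Int)
      = (((List.range (PySem.Int.bitLength (k:Int))).map
            (fun j => if (k >>> j) % 2 = 1 then N ^ j % MODULA else 0)).sum) % MODULA := by
  unfold process_alt
  rw [if_neg (by omega : ¬ ((k:Int) ≤ 0))]
  rw [PySem.List.pyRange_zero_natCast, pv_sum_filter_map, List.map_map,
      PySem.Int.mod_eq_emod_of_pos hMpos]
  refine congrArg (fun x : Int => x % MODULA) (congrArg List.sum (List.map_congr_left ?_))
  intro j hj
  simp only [Function.comp_apply, Int.toNat_natCast, PySem.Int.powMod_eq, PySem.Int.band_one]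
  rw [Int.shiftRight_natCast_right, ← Int.natCast_shiftRight,
      PySem.Int.mod_eq_emod_of_pos (by norm_num : (0:Int) < 2),
      PySem.Int.mod_eq_emod_of_pos hMpos]
  simp only [beq_iff_eq]
  rw [if_congr (show (((k >>> j : Nat) : Int) % 2 = 1) ↔ ((k >>> j) % 2 = 1) by omega) rfl rfl]

-- removing the per-term reduction mod MODULA under the final reduction
lemma pv_modsum (N : Int) (k : Nat) (L : Nat) :
    (((List.range L).map (fun j => if (k >>> j) % 2 = 1 then N ^ j % MODULA else 0)).sum) % MODULA
      = (((List.range L).map (fun j => if (k >>> j) % 2 = 1 then N ^ j else 0)).sum) % MODULA := by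
  induction L with
  | zero => rfl
  | succ m ih =>
    rw [List.range_succ, List.map_append, List.map_append, List.sum_append, List.sum_append]
    simp only [List.map_cons, List.map_nil, List.sum_cons, List.sum_nil, add_zero]
    have ht : (if (k >>> m) % 2 = 1 then N ^ m % MODULA else 0) % MODULA
            = (if (k >>> m) % 2 = 1 then N ^ m else 0) % MODULA := by
      by_cases h : (k >>> m) % 2 = 1 <;>
        simp [h, Int.emod_emod_of_dvd _ dvd_rfl]
    rw [Int.add_emod, ih, ht, ← Int.add_emod]

-- the exact-power if-sum over the bit length equals pvU
lemma pv_W_eq (N : Int) : ∀ k : Nat,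
    ((List.range (PySem.Int.bitLength (k:Int))).map
        (fun j => if (k >>> j) % 2 = 1 then N ^ j else 0)).sum = pvU N k := by
  intro k
  induction k using Nat.strong_induction_on with
  | _ k ih =>
  rcases Nat.eq_zero_or_pos k with rfl | hk
  · simp [pvU_zero, PySem.Int.bitLength_zero]
  · rw [PySem.Int.bitLength_natCast hk, List.range_succ_eq_map]
    simp only [List.map_cons, List.sum_cons, List.map_map]
    have htail : ∀ j ∈ List.range (PySem.Int.bitLength ((k/2 : Nat) : Int)),
        ((fun j => if (k >>> j) % 2 = 1 then N ^ j else 0) ∘ Nat.succ) j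
          = N * (if ((k/2) >>> j) % 2 = 1 then N ^ j else 0) := by
      intro j _
      have hs : k >>> (j+1) = (k/2) >>> j := by
        simp [Nat.shiftRight_eq_div_pow, Nat.div_div_eq_div_mul, pow_succ, Nat.mul_comm]
      simp only [Function.comp_apply, Nat.succ_eq_add_one, hs, pow_succ]
      split_ifs <;> ring
    rw [List.map_congr_left htail, List.sum_map_mul_left, ih (k/2) (by omega),
        pvU_pos N k hk]
    norm_num [Nat.shiftRight_zero]

-- characterization of B
lemma pv_alt_char (N : Int) (k : Nat) (hk : 0 < k) :
    process_alt N (k : Int) = pvU N k % MODULA := by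
  rw [pv_alt_sum N k hk, pv_modsum N k, pv_W_eq N k]

-- ===== VERDICT (by name: the statement is the Claim_ definition above) =====
theorem process_spec : Claim_equal_process := by
  intro N K _
  unfold Spec_process
  by_cases hK : K ≤ 0
  · unfold process process_alt
    rw [processLoop.eq_def, dif_neg (not_lt.mpr hK), if_pos hK]
  · have hK' : 0 < K := not_le.mp hK
    obtain ⟨k, rfl⟩ : ∃ k : Nat, K = (k : Int) := ⟨K.toNat, (Int.toNat_of_nonneg hK'.le).symm⟩
    have hk : 0 < k := by exact_mod_cast hK'
    rw [pv_process_char N k hk, pv_alt_char N k hk]
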